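-- pv_equiv track=rewrite | github.com/marques576/agentic-research-graph | agents/research_agent.py | _cooccurrence_relationships
-- ===== SOURCE A (Python) =====
-- def _cooccurrence_relationships(
--
--     text: str,
--     entity_names: list[str],
-- ) -> list[tuple[str, str, str]]:
--     """
--     Heuristic: two entities that appear within 200 characters of each other
--     are linked with a ``co-occurs-with`` relationship (confidence 0.3).
--
--     Parameters
--     ----------
--     text : str
--         Document text.
--     entity_names : list of str
--         Entity names to check for co-occurrence.
--
--     Returns
--     -------
--     list of (source, "co-occurs-with", target) tuples.
--     """
--     # Find character positions of each entity
--     positions: dict[str, list[int]] = {}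
--     lower_text = text.lower()
--     for name in entity_names:
--         pos_list: list[int] = []
--         search_from = 0
--         lower_name = name.lower()
--         while True:
--             idx = lower_text.find(lower_name, search_from)
--             if idx == -1:
--                 break
--             pos_list.append(idx)
--             search_from = idx + 1
--         if pos_list:
--             positions[name] = pos_list
--
--     triples: list[tuple[str, str, str]] = []
--     found_names = list(positions.keys())
--     seen: set[tuple[str, str]] = set()
--
--     for i, name_a in enumerate(found_names):
--         for name_b in found_names[i + 1:]:
--             # Check if any position of a is within 200 chars of any position of b
--             close = False
--             for pos_a in positions[name_a]:
--                 for pos_b in positions[name_b]: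
--                     if abs(pos_a - pos_b) <= 200:
--                         close = True
--                         break
--                 if close:
--                     break
--
--             if close:
--                 key = (name_a, name_b)
--                 if key not in seen:
--                     seen.add(key)
--                     triples.append((name_a, "co-occurs-with", name_b))
--
--     return triples
-- ===== SOURCE B (Python) =====
-- def _close(xs, ys):
--     # xs, ys ascending; two-pointer merge: advance the smaller head
--     i = j = 0
--     while i < len(xs) and j < len(ys):
--         if abs(xs[i] - ys[j]) <= 200:
--             return True
--         if xs[i] < ys[j]:
--             i += 1
--         else:
--             j += 1
--     return False
--
--
-- def _cooccurrence_relationships(text, entity_names):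
--     lt = text.lower()
--     n = len(lt)
--     found = []          # (name, ascending occurrence positions), first-seen order
--     for name in entity_names:
--         if any(name == f for f, _ in found):
--             continue
--         ln = name.lower()
--         k = len(ln)
--         pl = [i for i in range(n - k + 1) if lt[i:i + k] == ln]
--         if pl:
--             found.append((name, pl))
--     triples = []
--     rest = found
--     while rest:
--         (a, xs) = rest[0]
--         rest = rest[1:]
--         for (b, ys) in rest:
--             if _close(xs, ys):
--                 triples.append((a, "co-occurs-with", b))
--     return triples
-- ===== Notes on version B (the rewrite author's own statement) =====
-- stated objective: alternative
-- what changed: B finds each entity's occurrence positions with a single textbook substring scan over start indices range(n - k + 1) instead of A's repeated str.find loop, and decides whether two entities co-occur with a linear two-pointer merge over the two ascending position lists instead of A's quadratic all-pairs |pos_a - pos_b| comparison; the dict+seen-set bookkeeping is replaced by a deduplicated (name, positions) list consumed front to back.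
import Mathlib
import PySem

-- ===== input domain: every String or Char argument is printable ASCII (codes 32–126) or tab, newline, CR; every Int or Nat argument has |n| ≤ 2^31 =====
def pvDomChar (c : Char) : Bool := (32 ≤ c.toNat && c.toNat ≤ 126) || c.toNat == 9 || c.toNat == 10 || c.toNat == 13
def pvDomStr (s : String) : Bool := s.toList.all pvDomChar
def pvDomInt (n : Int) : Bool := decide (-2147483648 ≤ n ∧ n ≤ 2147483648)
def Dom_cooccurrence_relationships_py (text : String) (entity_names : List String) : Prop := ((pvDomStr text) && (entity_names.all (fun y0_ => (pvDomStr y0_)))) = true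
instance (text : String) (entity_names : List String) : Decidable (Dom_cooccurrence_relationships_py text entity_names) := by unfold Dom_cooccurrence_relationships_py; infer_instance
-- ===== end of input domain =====

-- B replaces A's repeated str.find scan by one textbook start-index substring scan per name
-- and A's all-pairs position comparison by a two-pointer merge over the ascending
-- occurrence lists; objective: alternative algorithm, same exact output.

-- ===== PORT A =====

-- termination fact for A's `while True: idx = lower_text.find(...)` loop
-- (the found index is ≥ the search start and ≤ len, so search_from strictly grows)
theorem pvFindFromBounds (s sub : List Char) (k : Nat)
    (h : PySem.Chars.findFrom s sub (k : Int) none ≠ -1) :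
    k ≤ (PySem.Chars.findFrom s sub (k : Int) none).toNat ∧
      (PySem.Chars.findFrom s sub (k : Int) none).toNat ≤ s.length := by
  by_cases hk : k ≤ s.length
  · have hspec := PySem.Chars.findFrom_natCast_spec s sub k hk h
    have hle : PySem.Chars.findFrom s sub (k : Int) none ≤ s.length := by
      rw [PySem.Chars.findFrom_natCast s sub k hk]
      have := PySem.Chars.find_le_length (s.drop k) sub
      simp only [List.length_drop] at this
      split <;> omega
    omega
  · exfalso
    apply h
    simp only [PySem.Chars.findFrom]
    have : (s.length : Int) < (k : Int) := by exact_mod_cast Nat.lt_of_not_le hk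
    simp only [if_neg (by omega : ¬ (k : Int) < 0)]
    rw [if_pos this]

-- A's occurrence loop: repeatedly find lower_name from search_from, collect, restart at idx+1
def pvFindAll (s sub : List Char) (k : Nat) : List Int :=
  let idx := PySem.Chars.findFrom s sub (k : Int) none
  if h : idx = -1 then []
  else idx :: pvFindAll s sub (idx.toNat + 1)
termination_by s.length + 1 - k
decreasing_by
  have := pvFindFromBounds s sub k h
  omega

-- body of A's `for name in entity_names:` loop building the positions dict
def pvStepA (lower_text : List Char) (positions : PySem.Dict String (List Int)) (name : String) : PySem.Dict String (List Int) :=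
  let pos_list := pvFindAll lower_text (PySem.Chars.lower name.toList) 0
  if pos_list ≠ [] then positions.insert name pos_list else positions

-- body of A's inner `for name_b in found_names[i + 1:]:` loop (name_a fixed)
def pvInnerA (positions : PySem.Dict String (List Int)) (name_a : String)
    (st : List (String × String × String) × PySem.Set (String × String)) (name_b : String) :
    List (String × String × String) × PySem.Set (String × String) :=
  let close := (positions.getD name_a []).any (fun pa =>
    (positions.getD name_b []).any (fun pb => decide ((pa - pb).natAbs ≤ 200)))
  if close then
    if PySem.Set.contains st.2 (name_a, name_b) then st
    else (st.1 ++ [(name_a, "co-occurs-with", name_b)], PySem.Set.add st.2 (name_a, name_b))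
  else st

def cooccurrence_relationships_py (text : String) (entity_names : List String) : List (String × String × String) :=
  let lower_text := PySem.Chars.lower text.toList
  let positions := entity_names.foldl (pvStepA lower_text) PySem.Dict.empty
  let found_names := positions.keys
  let res :=
    (PySem.List.enumerate found_names 0).foldl (fun st p =>
      (PySem.List.slice found_names (some (p.1 + 1)) none).foldl (pvInnerA positions p.2) st)
      ([], PySem.Set.empty)
  res.1

-- ===== PORT B =====

-- two-pointer closeness test over two ascending lists (Source B's _close)
def pvCloseB (xs ys : List Int) : Bool :=
  match xs, ys with
  | x :: xs', y :: ys' =>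
    if (x - y).natAbs ≤ 200 then true
    else if x < y then pvCloseB xs' (y :: ys') else pvCloseB (x :: xs') ys'
  | _, _ => false

-- body of Source B's `for name in entity_names:` loop building the found list
def pvStepB (lt : List Char) (found : List (String × List Int)) (name : String) : List (String × List Int) :=
  if found.any (fun f => name == f.1) then found
  else
    let ln := PySem.Chars.lower name.toList
    let k := ln.length
    let pl := (PySem.List.pyRange 0 ((lt.length : Int) - (k : Int) + 1) 1).filter
      (fun i => PySem.List.slice lt (some i) (some (i + (k : Int))) == ln)
    if pl ≠ [] then found ++ [(name, pl)] else found

-- Source B's `while rest:` pair loop, consuming the found list front to back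
def pvPairsB (rest : List (String × List Int)) (triples : List (String × String × String)) : List (String × String × String) :=
  match rest with
  | [] => triples
  | (a, xs) :: rest' =>
    pvPairsB rest' (rest'.foldl (fun t p =>
      if pvCloseB xs p.2 then t ++ [(a, "co-occurs-with", p.1)] else t) triples)

def cooccurrence_relationships_py_alt (text : String) (entity_names : List String) : List (String × String × String) :=
  let lt := PySem.Chars.lower text.toList
  let found := entity_names.foldl (pvStepB lt) []
  pvPairsB found []

-- ===== PRECONDITION & SPEC =====
def Spec_cooccurrence_relationships_py (text : String) (entity_names : List String) (out : List (String × String × String)) : Prop := out = cooccurrence_relationships_py_alt text entity_names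
instance (text : String) (entity_names : List String) (out : List (String × String × String)) : Decidable (Spec_cooccurrence_relationships_py text entity_names out) := by unfold Spec_cooccurrence_relationships_py; infer_instance

-- ===== CLAIM (what is proved, stated in full; the proofs are below) =====
def Claim_equal_cooccurrence_relationships_py : Prop := ∀ (text : String) (entity_names : List String), Dom_cooccurrence_relationships_py text entity_names → Spec_cooccurrence_relationships_py text entity_names (cooccurrence_relationships_py text entity_names)

-- ===== LEMMAS AND PROOFS =====

def pvOccs (s sub : List Char) (k : Nat) : List Int :=
  (List.range' k (s.length + 1 - k)).filterMap
    (fun i => if sub <+: s.drop i then some ((i : Int)) else none)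

theorem pvFindAll_eq_occs (s sub : List Char) (k : Nat) :
    pvFindAll s sub k = pvOccs s sub k := by
  fun_induction pvFindAll s sub k with
  | case1 k idx h =>
    unfold pvOccs
    symm
    by_cases hk : k ≤ s.length
    · rw [List.filterMap_eq_nil_iff]
      intro i hi
      rw [List.mem_range'] at hi
      obtain ⟨j, hj, rfl⟩ := hi
      simp only [one_mul]
      rw [if_neg]
      intro hpre
      have hni := (PySem.Chars.findFrom_natCast_eq_neg_one_iff s sub k hk).mp h
      apply hni
      have hdd : s.drop (k + j) = (s.drop k).drop j := by rw [List.drop_drop]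
      rw [hdd] at hpre
      exact hpre.isInfix.trans (List.drop_suffix j (s.drop k)).isInfix
    · have : s.length + 1 - k = 0 := by omega
      simp [this]
  | case2 k idx h ih =>
    have hb := pvFindFromBounds s sub k h
    have hk : k ≤ s.length := le_trans hb.1 hb.2
    have hspec := PySem.Chars.findFrom_natCast_spec s sub k hk h
    set m := idx.toNat with hm
    have hidx : idx = (m : Int) := by
      have h0 : 0 ≤ idx := by have := hspec.1; omega
      omega
    unfold pvOccs
    have hsplit : List.range' k (s.length + 1 - k) =
        List.range' k (m - k) ++ m :: List.range' (m + 1) (s.length - m) := by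
      have h1 : List.range' k (m - k) ++ List.range' (k + (m - k)) ((s.length + 1 - k) - (m - k)) = List.range' k (s.length + 1 - k) := by
        rw [List.range'_append_1]
        congr 1
        omega
      rw [← h1]
      congr 1
      have h2 : k + (m - k) = m := by omega
      have h3 : (s.length + 1 - k) - (m - k) = (s.length - m) + 1 := by omega
      rw [h2, h3, List.range'_succ]
    rw [hsplit, List.filterMap_append]
    have hfirst : (List.range' k (m - k)).filterMap
        (fun i => if sub <+: s.drop i then some ((i : Int)) else none) = [] := by
      rw [List.filterMap_eq_nil_iff]
      intro i hi
      rw [List.mem_range'] at hi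
      obtain ⟨j, hj, rfl⟩ := hi
      simp only [one_mul]
      rw [if_neg]
      exact hspec.2.2 (k + j) (by omega) (by omega)
    rw [hfirst, List.nil_append, List.filterMap_cons, if_pos hspec.2.1, ih]
    unfold pvOccs
    have h4 : s.length + 1 - (m + 1) = s.length - m := by omega
    rw [h4, hidx]

-- filterMap of a guarded some = map after filter
theorem pvFilterMapIf {α β : Type} (l : List α) (q : α → Prop) [DecidablePred q] (f : α → β) :
    l.filterMap (fun i => if q i then some (f i) else none)
      = (l.filter (fun i => decide (q i))).map f := by
  induction l with
  | nil => rfl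
  | cons x xs ih =>
    by_cases h : q x <;> simp [h, ih]

theorem pvTakeBeq (l ln : List Char) : (l.take ln.length == ln) = decide (ln <+: l) := by
  by_cases h : ln <+: l
  · have := List.prefix_iff_eq_take.mp h
    simp [← this, h]
  · simp only [decide_eq_false h, beq_eq_false_iff_ne, ne_eq]
    intro heq
    exact h (heq ▸ List.take_prefix _ _)

-- restricting pvOccs's index range to the textbook bound n+1-k loses nothing:
-- starts past n-k cannot carry a length-k prefix
theorem pvOccs_restrict (lt ln : List Char) :
    pvOccs lt ln 0 = (List.range (lt.length + 1 - ln.length)).filterMap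
      (fun i => if ln <+: lt.drop i then some ((i : Int)) else none) := by
  unfold pvOccs
  rw [Nat.sub_zero, ← List.range_eq_range']
  have hsplit : List.range (lt.length + 1) =
      List.range (lt.length + 1 - ln.length)
        ++ List.range' (lt.length + 1 - ln.length) ((lt.length + 1) - (lt.length + 1 - ln.length)) := by
    have h1 : lt.length + 1 = (lt.length + 1 - ln.length) + ((lt.length + 1) - (lt.length + 1 - ln.length)) := by omega
    conv_lhs => rw [List.range_eq_range', h1, ← List.range'_append_1]
    rw [Nat.zero_add, ← List.range_eq_range']
  rw [hsplit, List.filterMap_append]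
  have htail : (List.range' (lt.length + 1 - ln.length) ((lt.length + 1) - (lt.length + 1 - ln.length))).filterMap
      (fun i => if ln <+: lt.drop i then some ((i : Int)) else none) = [] := by
    rw [List.filterMap_eq_nil_iff]
    intro i hi
    rw [List.mem_range'] at hi
    obtain ⟨j, hj, rfl⟩ := hi
    simp only [one_mul]
    rw [if_neg]
    intro hpre
    have := hpre.length_le
    simp only [List.length_drop] at this
    omega
  rw [htail, List.append_nil]

theorem pvFilter_eq_occs (lt ln : List Char) :
    (PySem.List.pyRange 0 ((lt.length : Int) - (ln.length : Int) + 1) 1).filter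
      (fun i => PySem.List.slice lt (some i) (some (i + (ln.length : Int))) == ln)
      = pvOccs lt ln 0 := by
  have h1 : (((lt.length : Int) - (ln.length : Int) + 1) - 0).toNat = lt.length + 1 - ln.length := by
    omega
  rw [PySem.List.pyRange_one, h1]
  simp only [zero_add]
  rw [List.filter_map, pvOccs_restrict, pvFilterMapIf]
  congr 1
  apply List.filter_congr
  intro i hi
  simp only [Function.comp_apply]
  rw [PySem.List.slice_natCast_add, pvTakeBeq]

theorem pvOccs_sorted (s sub : List Char) (k : Nat) :
    (pvOccs s sub k).Pairwise (· < ·) := by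
  unfold pvOccs
  rw [pvFilterMapIf]
  apply List.Pairwise.map
  · intro a b (hab : a < b)
    exact_mod_cast hab
  · exact (List.pairwise_lt_range' 1 Nat.one_pos).filter _

theorem pvCloseB_eq_any (xs ys : List Int) (hx : xs.Pairwise (· < ·)) (hy : ys.Pairwise (· < ·)) :
    pvCloseB xs ys =
      xs.any (fun pa => ys.any (fun pb => decide ((pa - pb).natAbs ≤ 200))) := by
  induction xs generalizing ys with
  | nil => simp [pvCloseB]
  | cons x xs' ihx =>
    induction ys with
    | nil => simp [pvCloseB]
    | cons y ys' ihy =>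
      rw [pvCloseB]
      by_cases h1 : (x - y).natAbs ≤ 200
      · simp [h1]
      · rw [if_neg h1]
        rcases List.pairwise_cons.mp hx with ⟨hxall, hx'⟩
        rcases List.pairwise_cons.mp hy with ⟨hyall, hy'⟩
        by_cases h2 : x < y
        · rw [if_pos h2, ihx (y :: ys') hx' hy]
          have hrowx2 : ys'.any (fun pb => decide ((x - pb).natAbs ≤ 200)) = false := by
            rw [List.any_eq_false]
            intro pb hpb hc
            have := hyall pb hpb
            simp only [decide_eq_true_eq] at hc
            omega
          have hrowx : decide ((x - y).natAbs ≤ 200) = false := by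
            simp only [decide_eq_false_iff_not]
            exact h1
          simp [List.any_cons, hrowx, hrowx2]
        · rw [if_neg h2, ihy hy']
          have hyfar : ∀ pa ∈ x :: xs', (decide ((pa - y).natAbs ≤ 200)) = false := by
            intro pa hpa
            rcases List.mem_cons.mp hpa with rfl | hpa'
            · simp [h1]
            · have := hxall pa hpa'
              simp only [decide_eq_false_iff_not]
              omega
          have hcong : ∀ pa ∈ x :: xs',
              ((y :: ys').any (fun pb => decide ((pa - pb).natAbs ≤ 200)))
                = (ys'.any (fun pb => decide ((pa - pb).natAbs ≤ 200))) := by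
            intro pa hpa
            simp [List.any_cons, hyfar pa hpa]
          exact (PySem.List.any_congr_mem hcong).symm

-- the two build loops produce the same association list (A: dict items, B: pair list)
theorem pvBuild_eq (lt : List Char) (names : List String) :
    ∀ (d : PySem.Dict String (List Int)) (found : List (String × List Int)),
      d.items = found → d.keys.Nodup →
      (∀ p ∈ found, p.2 = pvOccs lt (PySem.Chars.lower p.1.toList) 0) →
      (names.foldl (pvStepA lt) d).items = names.foldl (pvStepB lt) found ∧
        (names.foldl (pvStepA lt) d).keys.Nodup ∧
        (∀ p ∈ names.foldl (pvStepB lt) found, p.2 = pvOccs lt (PySem.Chars.lower p.1.toList) 0) := by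
  induction names with
  | nil => exact fun d found h1 h2 h3 => ⟨h1, h2, h3⟩
  | cons name rest ih =>
    intro d found h1 h2 h3
    simp only [List.foldl_cons]
    have hkeys : d.keys = found.map Prod.fst := by rw [← h1]; rfl
    have hpl : pvFindAll lt (PySem.Chars.lower name.toList) 0
        = pvOccs lt (PySem.Chars.lower name.toList) 0 := pvFindAll_eq_occs _ _ _
    have hplB : (PySem.List.pyRange 0 ((lt.length : Int) - ((PySem.Chars.lower name.toList).length : Int) + 1) 1).filter
        (fun i => PySem.List.slice lt (some i) (some (i + ((PySem.Chars.lower name.toList).length : Int))) == (PySem.Chars.lower name.toList))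
        = pvOccs lt (PySem.Chars.lower name.toList) 0 := pvFilter_eq_occs _ _
    by_cases hc : d.contains name = true
    · -- name already a key: A overwrites with the same value, B skips
      have hmem : name ∈ found.map Prod.fst := by
        rw [← hkeys]; exact (PySem.Dict.contains_iff_mem_keys d name).mp hc
      have hany : found.any (fun f => name == f.1) = true := by
        rw [List.any_eq_true]
        rcases List.mem_map.mp hmem with ⟨f, hf, hf1⟩
        exact ⟨f, hf, by simp [hf1]⟩
      have hB : pvStepB lt found name = found := by
        unfold pvStepB; rw [if_pos hany]
      have hA : (pvStepA lt d name).items = found := by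
        simp only [pvStepA]
        split
        · rw [PySem.Dict.items_insert_of_contains d _ hc, ← h1]
          have : ∀ p ∈ d.items, (if (p.1 == name) = true then (name, pvFindAll lt (PySem.Chars.lower name.toList) 0) else p) = p := by
            intro p hp
            split
            · rename_i heq
              have hpn : p.1 = name := by simpa using heq
              have hv : p.2 = pvOccs lt (PySem.Chars.lower p.1.toList) 0 := h3 p (h1 ▸ hp)
              rw [hpl, ← hpn, ← hv]
            · rfl
          rw [List.map_congr_left this]
          simp
        · exact h1
      have hA2 : (pvStepA lt d name).keys.Nodup := by
        simp only [pvStepA]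
        split
        · exact PySem.Dict.nodup_keys_insert d _ _ h2
        · exact h2
      rw [hB]
      exact ih (pvStepA lt d name) found hA hA2 h3
    · -- fresh name
      have hcf : d.contains name = false := by simpa using hc
      have hnmem : name ∉ found.map Prod.fst := by
        rw [← hkeys]
        intro hk
        exact hc ((PySem.Dict.contains_iff_mem_keys d name).mpr hk)
      have hany : found.any (fun f => name == f.1) = false := by
        rw [List.any_eq_false]
        intro f hf hbeq
        exact hnmem (List.mem_map.mpr ⟨f, hf, by have := (beq_iff_eq).mp hbeq; simp [this]⟩)
      by_cases hne : pvOccs lt (PySem.Chars.lower name.toList) 0 = []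
      · -- no occurrence: both leave the state unchanged
        have hA : pvStepA lt d name = d := by
          simp only [pvStepA]
          rw [if_neg (by simp [hpl, hne])]
        have hB : pvStepB lt found name = found := by
          simp only [pvStepB]
          rw [if_neg (by simp [hany])]
          rw [if_neg (by simp [hplB, hne])]
        rw [hA, hB]
        exact ih d found h1 h2 h3
      · -- both append (name, occurrences)
        have hA : (pvStepA lt d name).items = found ++ [(name, pvOccs lt (PySem.Chars.lower name.toList) 0)] := by
          simp only [pvStepA]
          rw [if_pos (by simp [hpl, hne])]
          rw [PySem.Dict.items_insert_of_not_contains d _ hcf, h1, hpl]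
        have hA2 : (pvStepA lt d name).keys.Nodup := by
          simp only [pvStepA]
          split
          · exact PySem.Dict.nodup_keys_insert d _ _ h2
          · exact h2
        have hB : pvStepB lt found name = found ++ [(name, pvOccs lt (PySem.Chars.lower name.toList) 0)] := by
          simp only [pvStepB]
          rw [if_neg (by simp [hany])]
          rw [if_pos (by simp [hplB, hne]), hplB]
        rw [hB]
        refine ih (pvStepA lt d name) _ hA hA2 ?_
        intro p hp
        rcases List.mem_append.mp hp with hp' | hp'
        · exact h3 p hp'
        · rcases List.mem_singleton.mp hp' with rfl
          rfl

-- A's `for i, name_a in enumerate(found_names): for name_b in found_names[i+1:]`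
-- as a structural recursion consuming the list front to back
def pvAux {α β : Type} (g : β → α → List α → β) : List α → β → β
  | [], st => st
  | a :: r, st => pvAux g r (g st a r)

theorem pvOuter_eq (positions : PySem.Dict String (List Int)) (F : List String) :
    ∀ (L : List String) (s : Nat)
      (b : List (String × String × String) × PySem.Set (String × String)),
      F.drop s = L →
      (PySem.List.enumerate L ((s : Nat) : Int)).foldl
          (fun st p => (PySem.List.slice F (some (p.1 + 1)) none).foldl (pvInnerA positions p.2) st) b
        = pvAux (fun st a r => r.foldl (pvInnerA positions a) st) L b := by
  intro L
  induction L with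
  | nil => intro s b h; simp [PySem.List.enumerate, pvAux]
  | cons x L' ih =>
    intro s b h
    rw [PySem.List.enumerate_cons, List.foldl_cons]
    have hs1 : ((s : Int) + 1) = (((s + 1 : Nat)) : Int) := by push_cast; ring
    have hdrop : F.drop (s + 1) = L' := by
      have : F.drop (s + 1) = (F.drop s).drop 1 := by rw [List.drop_drop, Nat.add_comm]
      rw [this, h, List.drop_one, List.tail_cons]
    have hslice : PySem.List.slice F (some ((s : Int) + 1)) none = L' := by
      rw [hs1, PySem.List.slice_from_natCast, hdrop]
    rw [hslice, hs1, ih (s + 1) _ hdrop]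
    rfl

-- the inner loop: `seen` never fires for fresh pairs, and A's nested `any`
-- closeness equals B's two-pointer merge on the same ascending lists
theorem pvInner_eq (positions : PySem.Dict String (List Int)) (a : String) (xs : List Int)
    (hxa : positions.getD a [] = xs) (hxs : xs.Pairwise (· < ·)) :
    ∀ (r : List (String × List Int)) (t : List (String × String × String))
      (seen : PySem.Set (String × String)),
      (r.map Prod.fst).Nodup →
      (∀ p ∈ r, positions.getD p.1 [] = p.2) →
      (∀ p ∈ r, p.2.Pairwise (· < ·)) →
      (∀ p ∈ r, (a, p.1) ∉ seen) →
      ∃ seen', ((r.map Prod.fst).foldl (pvInnerA positions a) (t, seen))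
          = (r.foldl (fun t p => if pvCloseB xs p.2 then t ++ [(a, "co-occurs-with", p.1)] else t) t, seen')
        ∧ ∀ q ∈ seen', q ∈ seen ∨ q.1 = a := by
  intro r
  induction r with
  | nil => exact fun t seen _ _ _ _ => ⟨seen, rfl, fun q hq => Or.inl hq⟩
  | cons p r' ih =>
    intro t seen hnd h2 h3 h4
    obtain ⟨b, ys⟩ := p
    simp only [List.map_cons, List.foldl_cons]
    have hyb : positions.getD b [] = ys := h2 (b, ys) (List.mem_cons_self ..)
    have hys : ys.Pairwise (· < ·) := h3 (b, ys) (List.mem_cons_self ..)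
    have hclose : pvInnerA positions a (t, seen) b
        = (if pvCloseB xs ys then t ++ [(a, "co-occurs-with", b)] else t,
           if pvCloseB xs ys then seen ++ [(a, b)] else seen) := by
      simp only [pvInnerA, hxa, hyb]
      rw [← pvCloseB_eq_any xs ys hxs hys]
      by_cases hcl : pvCloseB xs ys
      · rw [if_pos hcl, if_pos hcl, if_pos hcl]
        have hns : (a, b) ∉ seen := h4 (b, ys) (List.mem_cons_self ..)
        have hcont : PySem.Set.contains seen (a, b) = false := by
          rw [← Bool.not_eq_true, PySem.Set.contains_iff]
          exact hns
        rw [if_neg (by rw [hcont]; exact Bool.false_ne_true)]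
        have hadd : PySem.Set.add seen (a, b) = seen ++ [(a, b)] := by
          unfold PySem.Set.add
          rw [hcont]
          simp
        rw [hadd]
      · rw [if_neg hcl, if_neg hcl, if_neg hcl]
    rw [hclose]
    rcases List.nodup_cons.mp hnd with ⟨hbnot, hnd'⟩
    by_cases hcl : pvCloseB xs ys
    · rw [if_pos hcl, if_pos hcl]
      have hseen2 : ∀ p ∈ r', (a, p.1) ∉ seen ++ [(a, b)] := by
        intro p hp hmem
        rcases List.mem_append.mp hmem with hm | hm
        · exact h4 p (List.mem_cons_of_mem _ hp) hm
        · have : p.1 = b := by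
            have := List.mem_singleton.mp hm
            exact congrArg Prod.snd this
          exact hbnot (this ▸ List.mem_map.mpr ⟨p, hp, rfl⟩)
      obtain ⟨seen', heq, hsub⟩ := ih (t ++ [(a, "co-occurs-with", b)]) (seen ++ [(a, b)]) hnd'
        (fun p hp => h2 p (List.mem_cons_of_mem _ hp))
        (fun p hp => h3 p (List.mem_cons_of_mem _ hp)) hseen2
      refine ⟨seen', heq, ?_⟩
      intro q hq
      rcases hsub q hq with hm | hm
      · rcases List.mem_append.mp hm with hm' | hm'
        · exact Or.inl hm'
        · right
          rcases List.mem_singleton.mp hm' with rfl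
          rfl
      · exact Or.inr hm
    · rw [if_neg hcl, if_neg hcl]
      exact ih t seen hnd' (fun p hp => h2 p (List.mem_cons_of_mem _ hp))
        (fun p hp => h3 p (List.mem_cons_of_mem _ hp))
        (fun p hp => h4 p (List.mem_cons_of_mem _ hp))

-- the pair loops agree
theorem pvPairs_eq (positions : PySem.Dict String (List Int)) :
    ∀ (found : List (String × List Int)) (t : List (String × String × String))
      (seen : PySem.Set (String × String)),
      (found.map Prod.fst).Nodup →
      (∀ p ∈ found, positions.getD p.1 [] = p.2) →
      (∀ p ∈ found, p.2.Pairwise (· < ·)) →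
      (∀ p ∈ found, ∀ q ∈ found, (p.1, q.1) ∉ seen) →
      (pvAux (fun st a r => r.foldl (pvInnerA positions a) st) (found.map Prod.fst) (t, seen)).1
        = pvPairsB found t := by
  intro found
  induction found with
  | nil => intro t seen _ _ _ _; rfl
  | cons p r ih =>
    intro t seen hnd h2 h3 h4
    obtain ⟨a, xs⟩ := p
    simp only [List.map_cons]
    rw [pvAux]
    rcases List.nodup_cons.mp hnd with ⟨hanot, hnd'⟩
    have hxa : positions.getD a [] = xs := h2 (a, xs) (List.mem_cons_self ..)
    have hxs : xs.Pairwise (· < ·) := h3 (a, xs) (List.mem_cons_self ..)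
    obtain ⟨seen', heq, hsub⟩ := pvInner_eq positions a xs hxa hxs r t seen hnd'
      (fun p hp => h2 p (List.mem_cons_of_mem _ hp))
      (fun p hp => h3 p (List.mem_cons_of_mem _ hp))
      (fun p hp => h4 (a, xs) (List.mem_cons_self ..) p (List.mem_cons_of_mem _ hp))
    rw [heq]
    rw [pvPairsB]
    refine ih _ seen' hnd' (fun p hp => h2 p (List.mem_cons_of_mem _ hp))
      (fun p hp => h3 p (List.mem_cons_of_mem _ hp)) ?_
    intro p hp q hq hmem
    rcases hsub _ hmem with hm | hm
    · exact h4 p (List.mem_cons_of_mem _ hp) q (List.mem_cons_of_mem _ hq) hm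
    · exact hanot (hm ▸ List.mem_map.mpr ⟨p, hp, rfl⟩)

-- ===== VERDICT (by name: the statement is the Claim_ definition above) =====
theorem cooccurrence_relationships_py_spec : Claim_equal_cooccurrence_relationships_py := by
  intro text entity_names _
  unfold Spec_cooccurrence_relationships_py
  simp only [cooccurrence_relationships_py, cooccurrence_relationships_py_alt]
  obtain ⟨hitems, hnodup, hval⟩ :=
    pvBuild_eq (PySem.Chars.lower text.toList) entity_names PySem.Dict.empty []
      rfl (by exact List.nodup_nil) (by simp)
  set lt := PySem.Chars.lower text.toList
  set d := entity_names.foldl (pvStepA lt) PySem.Dict.empty with hd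
  set found := entity_names.foldl (pvStepB lt) [] with hfound
  have hkeys : d.keys = found.map Prod.fst := by
    show d.items.map Prod.fst = found.map Prod.fst
    rw [hitems]
  have h0 : ((0 : Nat) : Int) = (0 : Int) := by norm_num
  rw [← h0, pvOuter_eq d d.keys d.keys 0 ([], PySem.Set.empty) rfl, hkeys]
  apply pvPairs_eq
  · rw [← hkeys]; exact hnodup
  · intro p hp
    exact PySem.Dict.getD_of_mem_items d (hitems ▸ hp) hnodup []
  · intro p hp
    rw [hval p hp]
    exact pvOccs_sorted _ _ _
  · intro p _ q _ hmem
    simp [PySem.Set.empty] at hmem
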